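-- pv_equiv track=rewrite | github.com/dungquixote42/nsb-parametric-tank-designer | paradoxparser.py | space_is_delimiter
-- ===== SOURCE A (Python) =====
-- COUNTS_AS_DATA = "-.@_"
--
-- def character_is_data(character: str):
--     return character.isalnum() or character in COUNTS_AS_DATA
--
-- def space_is_delimiter(content: str, contentIndex: int):
--     for character in content[contentIndex:]:
--         if character == " ":
--             continue
--         elif character_is_data(character):
--             break
--         else:
--             return False
--     for character in content[:contentIndex][::-1]:
--         if character == " ":
--             continue
--         elif character_is_data(character):
--             return True
--         else:
--             return False
--     return False
-- ===== SOURCE B (Python) =====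
-- COUNTS_AS_DATA = "-.@_"
--
-- def character_is_data(character: str):
--     return character.isalnum() or character in COUNTS_AS_DATA
--
-- def space_is_delimiter(content: str, contentIndex: int):
--     # One forward pass over the whole string: remember the last non-space char
--     # strictly before the (slice-normalized) index and the first non-space char
--     # at/after it, then decide from those two characters.
--     n = len(content)
--     i = contentIndex + n if contentIndex < 0 else contentIndex
--     i = max(0, min(n, i))
--     before = None
--     after = None
--     for k, ch in enumerate(content):
--         if ch == " ":
--             continue
--         if k < i:
--             before = ch
--         elif after is None:
--             after = ch
--     if after is not None and not character_is_data(after):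
--         return False
--     return before is not None and character_is_data(before)
-- ===== Notes on version B (the rewrite author's own statement) =====
-- stated objective: alternative
-- what changed: Replaces A's two directional skip-spaces scans with early returns by a single forward pass over the whole string that accumulates the last non-space character before the (slice-normalized) index and the first non-space character at or after it, then decides from those two characters at the end.
import Mathlib
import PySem

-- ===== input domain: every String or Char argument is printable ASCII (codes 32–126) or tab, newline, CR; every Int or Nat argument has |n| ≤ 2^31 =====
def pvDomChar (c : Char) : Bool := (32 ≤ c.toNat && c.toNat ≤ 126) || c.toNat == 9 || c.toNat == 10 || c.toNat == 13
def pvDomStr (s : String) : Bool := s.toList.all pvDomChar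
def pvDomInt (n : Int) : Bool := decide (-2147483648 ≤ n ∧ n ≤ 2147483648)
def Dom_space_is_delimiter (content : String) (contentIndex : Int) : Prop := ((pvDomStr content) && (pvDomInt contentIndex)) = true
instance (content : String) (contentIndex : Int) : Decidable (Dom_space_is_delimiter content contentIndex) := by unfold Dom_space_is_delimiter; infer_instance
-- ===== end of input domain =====

-- B replaces A's two directional skip-and-branch loops (with early returns) by ONE full forward
-- pass that accumulates the last non-space char before the index and the first non-space char
-- at/after it, deciding at the end (objective: alternative); return values agree on all inputs.

-- ===== PORT A =====
-- character_is_data: c.isalnum() or c in "-.@_"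
def pvCharIsData (c : Char) : Bool := PySem.Chars.isalnum c || ("-.@_".toList.contains c)

-- first for-loop of A: some false = 'return False'; none = loop broke or was exhausted
def pvFwdLoop : List Char → Option Bool
  | [] => none
  | c :: rest =>
    if c == ' ' then pvFwdLoop rest
    else if pvCharIsData c then none
    else some false

-- second for-loop of A (over the reversed prefix); falling off the loop is 'return False'
def pvBwdLoop : List Char → Bool
  | [] => false
  | c :: rest =>
    if c == ' ' then pvBwdLoop rest
    else if pvCharIsData c then true
    else false

def space_is_delimiter (content : String) (contentIndex : Int) : Bool :=
  -- content[contentIndex:]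
  match pvFwdLoop (PySem.List.slice content.toList (some contentIndex) none) with
  | some b => b
  | none =>
    -- content[:contentIndex][::-1]  ([::-1] = reverse, exact: PySem.List.slice?_none_none_neg_one)
    pvBwdLoop (PySem.List.slice content.toList none (some contentIndex)).reverse

-- ===== PORT B =====
-- body of B's single 'for k, ch in enumerate(content)' loop; state = (before, after)
def pvStep (i : Int) (st : Option Char × Option Char) (p : Int × Char) : Option Char × Option Char :=
  if p.2 == ' ' then st
  else if p.1 < i then (some p.2, st.2)
  else match st.2 with
    | none => (st.1, some p.2)
    | some _ => st

def space_is_delimiter_alt (content : String) (contentIndex : Int) : Bool :=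
  let l := content.toList
  let n : Int := l.length
  -- i = contentIndex + n if contentIndex < 0 else contentIndex; i = max(0, min(n, i))
  let i0 : Int := if contentIndex < 0 then contentIndex + n else contentIndex
  let i : Int := max 0 (min n i0)
  let st := (PySem.List.enumerate l).foldl (pvStep i) (none, none)
  -- if after is not None and not character_is_data(after): return False
  if st.2.any (fun c => !pvCharIsData c) then false
  -- return before is not None and character_is_data(before)
  else st.1.any pvCharIsData

-- ===== PRECONDITION & SPEC =====
def Spec_space_is_delimiter (content : String) (contentIndex : Int) (out : Bool) : Prop := out = space_is_delimiter_alt content contentIndex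
instance (content : String) (contentIndex : Int) (out : Bool) : Decidable (Spec_space_is_delimiter content contentIndex out) := by unfold Spec_space_is_delimiter; infer_instance

-- ===== CLAIM (what is proved, stated in full; the proofs are below) =====
def Claim_equal_space_is_delimiter : Prop := ∀ (content : String) (contentIndex : Int), Dom_space_is_delimiter content contentIndex → Spec_space_is_delimiter content contentIndex (space_is_delimiter content contentIndex)

-- ===== LEMMAS AND PROOFS =====

-- A's forward loop, characterised by the first non-space character of its input
theorem pvFwdLoop_eq (l : List Char) :
    pvFwdLoop l =
      if ((l.dropWhile (fun c => c == ' ')).head?.any (fun c => !pvCharIsData c)) then some false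
      else none := by
  induction l with
  | nil => simp [pvFwdLoop]
  | cons c rest ih =>
    by_cases h : c == ' '
    · simp [pvFwdLoop, List.dropWhile, h, ih]
    · by_cases hd : pvCharIsData c <;> simp [pvFwdLoop, List.dropWhile, h, hd]

-- A's backward loop, characterised the same way
theorem pvBwdLoop_eq (l : List Char) :
    pvBwdLoop l = (l.dropWhile (fun c => c == ' ')).head?.any pvCharIsData := by
  induction l with
  | nil => simp [pvBwdLoop]
  | cons c rest ih =>
    by_cases h : c == ' '
    · simp [pvBwdLoop, List.dropWhile, h, ih]
    · by_cases hd : pvCharIsData c <;> simp [pvBwdLoop, List.dropWhile, h, hd]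

theorem head?_dropWhile_append (p : Char → Bool) (xs : List Char) (x : Char) :
    ((xs ++ [x]).dropWhile p).head? =
      if p x then (xs.dropWhile p).head?
      else ((xs.dropWhile p).head?).or (some x) := by
  induction xs with
  | nil => by_cases h : p x <;> simp [List.dropWhile, h]
  | cons c rest ih =>
    by_cases h : p c
    · simpa [List.dropWhile, h] using ih
    · by_cases hx : p x <;> simp [List.dropWhile, h]

-- invariant of B's single pass: the accumulated pair, as a function of the split at index i
theorem pvStep_foldl (l : List Char) (i : Int) : ∀ (s : Int) (b a : Option Char),
    (PySem.List.enumerate l s).foldl (pvStep i) (b, a) =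
      ((((l.take (i - s).toNat).reverse.dropWhile (fun c => c == ' ')).head?).or b,
        a.or (((l.drop (i - s).toNat).dropWhile (fun c => c == ' ')).head?)) := by
  induction l with
  | nil => intro s b a; simp [PySem.List.enumerate]
  | cons c rest ih =>
    intro s b a
    rw [PySem.List.enumerate_cons, List.foldl_cons]
    by_cases hsp : c == ' '
    · by_cases hsi : s < i
      · have ht : (i - s).toNat = (i - (s + 1)).toNat + 1 := by omega
        rw [ht]
        simp only [pvStep, hsp, ih, List.take_succ_cons, List.drop_succ_cons,
          List.reverse_cons, head?_dropWhile_append]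
        simp
      · have ht : (i - s).toNat = 0 := by omega
        have ht' : (i - (s + 1)).toNat = 0 := by omega
        simp only [pvStep, hsp, ih, ht, ht', List.take_zero, List.drop_zero,
          List.dropWhile]
        simp
    · by_cases hsi : s < i
      · have ht : (i - s).toNat = (i - (s + 1)).toNat + 1 := by omega
        rw [ht]
        simp only [pvStep, hsp, ih, List.take_succ_cons, List.drop_succ_cons,
          List.reverse_cons, head?_dropWhile_append]
        simp only [if_neg, Bool.false_eq_true, not_false_iff, if_pos hsi]
        simp
      · have ht : (i - s).toNat = 0 := by omega
        have ht' : (i - (s + 1)).toNat = 0 := by omega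
        simp only [pvStep, ht, List.take_zero, List.drop_zero]
        rw [if_neg (by simpa using hsp), if_neg hsi]
        cases a with
        | none => simp [ih, ht', List.dropWhile, hsp]
        | some d => simp [ih, ht', List.dropWhile, hsp]

-- the Python clamp in B equals PySem's slice-index clamp used by A's slices
theorem clampIdx_eq (n : Nat) (ci : Int) :
    (max 0 (min (n : Int) (if ci < 0 then ci + n else ci))).toNat = PySem.List.clampIdx n ci := by
  unfold PySem.List.clampIdx
  split_ifs <;> omega

theorem slice_from_drop (l : List Char) (ci : Int) :
    PySem.List.slice l (some ci) none = l.drop (PySem.List.clampIdx l.length ci) := by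
  simp [PySem.List.slice]

theorem slice_to_take (l : List Char) (ci : Int) :
    PySem.List.slice l none (some ci) = l.take (PySem.List.clampIdx l.length ci) := by
  simp [PySem.List.slice]

-- ===== VERDICT (by name: the statement is the Claim_ definition above) =====
theorem space_is_delimiter_spec : Claim_equal_space_is_delimiter := by
  intro content contentIndex _
  unfold Spec_space_is_delimiter
  simp only [space_is_delimiter, space_is_delimiter_alt, pvFwdLoop_eq, pvBwdLoop_eq,
    slice_from_drop, slice_to_take, pvStep_foldl]
  rw [show ((max 0 (min ((content.toList.length : Int)) (if contentIndex < 0 then contentIndex + (content.toList.length : Int) else contentIndex))) - 0).toNat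
      = PySem.List.clampIdx content.toList.length contentIndex from by
    rw [sub_zero]; exact clampIdx_eq _ _]
  simp only [Option.or_none, Option.none_or]
  split_ifs with h
  · simp
  · simp
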